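-- pv_equiv track=rewrite | github.com/sjoon-oh/Aker | script/pgvector-base/2-runs/trace-stress.py | find_search_segments
-- ===== SOURCE A (Python) =====
-- def find_search_segments(op_list):
--     segments = []
--     start = None
--
--     for idx, item in enumerate(op_list):
--         if item['operation'] == 'search':
--             if start is None:
--                 start = idx
--         else:
--             if start is not None:
--                 segments.append((start, idx - 1))
--                 start = None
--
--     # Handle case where last items are 'search'
--     if start is not None:
--         segments.append((start, len(op_list) - 1))
--
--     return segments
-- ===== SOURCE B (Python) =====
-- def _run_len(keys):
--     # length of the maximal constant run at the head of keys (keys non-empty)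
--     n = 1
--     while n < len(keys) and keys[n] == keys[0]:
--         n += 1
--     return n
--
-- def find_search_segments(op_list):
--     keys = [item['operation'] == 'search' for item in op_list]
--     segments = []
--     idx = 0
--     while keys:
--         n = _run_len(keys)
--         if keys[0]:
--             segments.append((idx, idx + n - 1))
--         idx += n
--         keys = keys[n:]
--     return segments
-- ===== Notes on version B (the rewrite author's own statement) =====
-- stated objective: alternative
-- what changed: Replaced the open/close sentinel state machine (tracking an optional run start while enumerating) with a run-partition decomposition: precompute the boolean key list, then repeatedly measure the maximal constant run at the head, emit (idx, idx+n-1) for 'search' runs, and drop the run.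
import Mathlib
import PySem

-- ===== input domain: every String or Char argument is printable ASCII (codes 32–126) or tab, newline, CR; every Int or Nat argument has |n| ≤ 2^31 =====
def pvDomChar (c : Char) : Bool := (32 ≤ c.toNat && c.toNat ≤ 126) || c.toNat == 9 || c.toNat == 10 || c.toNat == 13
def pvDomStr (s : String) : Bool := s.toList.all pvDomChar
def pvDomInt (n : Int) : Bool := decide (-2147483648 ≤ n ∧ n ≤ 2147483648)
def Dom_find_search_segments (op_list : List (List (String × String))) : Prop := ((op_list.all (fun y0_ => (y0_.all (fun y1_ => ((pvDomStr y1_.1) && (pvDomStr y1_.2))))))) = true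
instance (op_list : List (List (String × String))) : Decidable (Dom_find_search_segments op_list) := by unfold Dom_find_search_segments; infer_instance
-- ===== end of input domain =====

-- B replaces A's open/close sentinel state machine with a run-partition decomposition
-- (precompute boolean keys, split off maximal runs, emit one segment per 'search' run);
-- objective: alternative (same O(n) cost, different structure).

-- ===== PORT A =====
-- item['operation'] : first-match lookup in the association list; Pre_ guarantees the key
-- is present (Python raises KeyError otherwise), so the getD "" default is never used there.
def opKey (item : List (String × String)) : String := (item.lookup "operation").getD ""

def find_search_segments (op_list : List (List (String × String))) : List (Int × Int) :=
  let st := (PySem.List.enumerate op_list 0).foldl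
    (fun (st : List (Int × Int) × Option Int) (p : Int × List (String × String)) =>
      if opKey p.2 == "search" then
        match st.2 with
        | none => (st.1, some p.1)
        | some _ => st
      else
        match st.2 with
        | some s => (st.1 ++ [(s, p.1 - 1)], none)
        | none => st)
    ([], none)
  match st.2 with
  | some s => st.1 ++ [(s, (op_list.length : Int) - 1)]
  | none => st.1

-- ===== PORT B =====
-- _run_len's inner while loop, counting how far the tail keeps matching the head key
def runLenAux (k : Bool) : List Bool → Nat
  | [] => 0
  | b :: bs => if b == k then 1 + runLenAux k bs else 0

-- _run_len(keys) for non-empty keys (n starts at 1, then scans the tail)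
def runLen (keys : List Bool) : Nat :=
  match keys with
  | [] => 0
  | k :: rest => 1 + runLenAux k rest

-- the while loop of B: split off the head run, emit a segment if it is a 'search' run
def segsLoop (keys : List Bool) (idx : Int) (segments : List (Int × Int)) : List (Int × Int) :=
  match keys with
  | [] => segments
  | k :: rest =>
    let n := runLen (k :: rest)
    let segments' := if k then segments ++ [(idx, idx + (n : Int) - 1)] else segments
    segsLoop (rest.drop (n - 1)) (idx + (n : Int)) segments'
termination_by keys.length
decreasing_by
  simp [runLen]

def find_search_segments_alt (op_list : List (List (String × String))) : List (Int × Int) :=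
  segsLoop (op_list.map (fun item => opKey item == "search")) 0 []

-- ===== PRECONDITION & SPEC =====
-- Pre_ excludes exactly the inputs where some item lacks the 'operation' key: Python A
-- raises KeyError there (and B does too).
def Pre_find_search_segments (op_list : List (List (String × String))) : Prop :=
  ∀ item ∈ op_list, (item.lookup "operation").isSome = true
instance (op_list : List (List (String × String))) : Decidable (Pre_find_search_segments op_list) := by unfold Pre_find_search_segments; infer_instance

def pvWitness_find_search_segments : (List (List (String × String))) :=
  [[("operation", "search")], [("operation", "insert")], [("operation", "search")]]

def Spec_find_search_segments (op_list : List (List (String × String))) (out : List (Int × Int)) : Prop := out = find_search_segments_alt op_list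
instance (op_list : List (List (String × String))) (out : List (Int × Int)) : Decidable (Spec_find_search_segments op_list out) := by unfold Spec_find_search_segments; infer_instance

-- ===== CLAIM (what is proved, stated in full; the proofs are below) =====
def Claim_equal_find_search_segments : Prop := ∀ (op_list : List (List (String × String))), Dom_find_search_segments op_list → Pre_find_search_segments op_list → Spec_find_search_segments op_list (find_search_segments op_list)

-- ===== LEMMAS AND PROOFS =====

lemma runLenAux_le (k : Bool) (ks : List Bool) : runLenAux k ks ≤ ks.length := by
  induction ks with
  | nil => simp [runLenAux]
  | cons b bs ih =>
    by_cases h : b == k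
    · simp only [runLenAux, if_pos h, List.length_cons]
      omega
    · simp only [runLenAux, if_neg h, List.length_cons]
      omega

-- A's loop, restated as a recursion over the list of boolean keys
def auxK (ks : List Bool) (i : Int) (st : List (Int × Int) × Option Int) : List (Int × Int) × Option Int :=
  match ks with
  | [] => st
  | k :: rest =>
      auxK rest (i + 1)
        (if k then
           match st.2 with | none => (st.1, some i) | some _ => st
         else
           match st.2 with | some s => (st.1 ++ [(s, i - 1)], none) | none => st)

-- A's final step: close a still-open segment at end index e
def closeAt (st : List (Int × Int) × Option Int) (e : Int) : List (Int × Int) :=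
  match st.2 with
  | some s => st.1 ++ [(s, e)]
  | none => st.1

lemma fold_enum_eq_auxK (xs : List (List (String × String))) :
    ∀ (i : Int) (st : List (Int × Int) × Option Int),
    (PySem.List.enumerate xs i).foldl
      (fun (st : List (Int × Int) × Option Int) (p : Int × List (String × String)) =>
        if opKey p.2 == "search" then
          match st.2 with
          | none => (st.1, some p.1)
          | some _ => st
        else
          match st.2 with
          | some s => (st.1 ++ [(s, p.1 - 1)], none)
          | none => st)
      st
    = auxK (xs.map (fun item => opKey item == "search")) i st := by
  induction xs with
  | nil => intro i st; simp [PySem.List.enumerate_nil, auxK]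
  | cons x xs ih =>
    intro i st
    rw [PySem.List.enumerate_cons]
    simp only [List.foldl_cons, List.map_cons, auxK, ih]

lemma drop_runLenAux_ne (k : Bool) (ks : List Bool) (b : Bool) (rest : List Bool)
    (h : ks.drop (runLenAux k ks) = b :: rest) : b ≠ k := by
  induction ks generalizing rest with
  | nil => simp [runLenAux] at h
  | cons b' ks' ih =>
    simp only [runLenAux] at h
    by_cases hb : b' == k
    · rw [if_pos hb, Nat.add_comm, List.drop_succ_cons] at h
      exact ih _ h
    · rw [if_neg hb, List.drop_zero] at h
      injection h with h1 _
      subst h1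
      simpa using hb

-- processing a maximal run of 'search' keys with an open segment: either the list is
-- exhausted (segment stays open) or the first non-search key closes it
lemma auxK_open (ks : List Bool) :
    ∀ (idx s : Int) (segs : List (Int × Int)),
    auxK ks idx (segs, some s) =
      match ks.drop (runLenAux true ks) with
      | [] => (segs, some s)
      | _ :: rest => auxK rest (idx + (runLenAux true ks : Int) + 1)
          (segs ++ [(s, idx + (runLenAux true ks : Int) - 1)], none) := by
  induction ks with
  | nil => intro idx s segs; simp [auxK, runLenAux]
  | cons k ks' ih =>
    intro idx s segs
    cases k with
    | true =>
      have step : auxK (true :: ks') idx (segs, some s) = auxK ks' (idx + 1) (segs, some s) := by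
        simp [auxK]
      have hrun : runLenAux true (true :: ks') = runLenAux true ks' + 1 := by
        simp [runLenAux]; omega
      rw [step, ih, hrun, List.drop_succ_cons]
      cases h : ks'.drop (runLenAux true ks') with
      | nil => simp
      | cons b rest =>
        have e1 : idx + 1 + (runLenAux true ks' : Int) + 1
            = idx + ((runLenAux true ks' + 1 : Nat) : Int) + 1 := by push_cast; ring
        have e2 : idx + 1 + (runLenAux true ks' : Int) - 1
            = idx + ((runLenAux true ks' + 1 : Nat) : Int) - 1 := by push_cast; ring
        rw [e1, e2]
    | false =>
      have hrun : runLenAux true (false :: ks') = 0 := by simp [runLenAux]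
      have step : auxK (false :: ks') idx (segs, some s)
          = auxK ks' (idx + 1) (segs ++ [(s, idx - 1)], none) := by
        simp [auxK]
      rw [hrun, List.drop_zero, step]
      norm_num

-- a leading non-search run contributes nothing: B's loop at a false head advances by one
lemma segsLoop_false (ks : List Bool) (idx : Int) (segs : List (Int × Int)) :
    segsLoop (false :: ks) idx segs = segsLoop ks (idx + 1) segs := by
  cases ks with
  | nil =>
    simp [segsLoop, runLen, runLenAux]
  | cons b ks' =>
    cases b with
    | false =>
      conv_lhs => rw [segsLoop.eq_def]
      conv_rhs => rw [segsLoop.eq_def]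
      simp only [runLen, runLenAux, beq_self_eq_true, if_true, Bool.false_eq_true, if_false]
      have h1 : (1 + (1 + runLenAux false ks') - 1) = runLenAux false ks' + 1 := by omega
      have h2 : (1 + runLenAux false ks' - 1) = runLenAux false ks' := by omega
      rw [h1, h2, List.drop_succ_cons]
      have : idx + ((1 + (1 + runLenAux false ks') : Nat) : Int)
          = idx + 1 + ((1 + runLenAux false ks' : Nat) : Int) := by push_cast; ring
      rw [this]
    | true =>
      conv_lhs => rw [segsLoop.eq_def]
      simp [runLen, runLenAux]

-- MAIN: A's state machine over the keys (started with no open segment) agrees with B's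
-- run-splitting loop, for every starting index and accumulator
lemma main_lemma : ∀ (n : Nat) (ks : List Bool), ks.length ≤ n →
    ∀ (idx : Int) (segs : List (Int × Int)),
    closeAt (auxK ks idx (segs, none)) (idx + (ks.length : Int) - 1) = segsLoop ks idx segs := by
  intro n
  induction n with
  | zero =>
    intro ks h idx segs
    have : ks = [] := List.length_eq_zero_iff.mp (Nat.le_zero.mp h)
    subst this
    rw [segsLoop.eq_def]
    simp [auxK, closeAt]
  | succ n ih =>
    intro ks h idx segs
    cases ks with
    | nil =>
      rw [segsLoop.eq_def]
      simp [auxK, closeAt]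
    | cons k ks' =>
      cases k with
      | false =>
        have step : auxK (false :: ks') idx (segs, none) = auxK ks' (idx + 1) (segs, none) := by
          simp [auxK]
        rw [step, segsLoop_false]
        have hend : idx + ((false :: ks').length : Int) - 1
            = (idx + 1) + (ks'.length : Int) - 1 := by simp; ring
        rw [hend]
        exact ih ks' (by simp at h; omega) (idx + 1) segs
      | true =>
        have step : auxK (true :: ks') idx (segs, none) = auxK ks' (idx + 1) (segs, some idx) := by
          simp [auxK]
        rw [step, auxK_open]
        have hmle : runLenAux true ks' ≤ ks'.length := runLenAux_le _ _
        cases hdrop : ks'.drop (runLenAux true ks') with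
        | nil =>
          -- the whole rest is a search run: segment stays open, closed at the end
          have hmlen : runLenAux true ks' = ks'.length := by
            have := List.drop_eq_nil_iff.mp hdrop
            omega
          simp only [closeAt]
          rw [segsLoop.eq_def]
          simp only [runLen, if_true]
          have hdrop2 : ks'.drop (1 + runLenAux true ks' - 1) = [] := by
            have : 1 + runLenAux true ks' - 1 = runLenAux true ks' := by omega
            rw [this]; exact hdrop
          rw [hdrop2, segsLoop.eq_def]
          simp only []
          have : idx + ((true :: ks').length : Int) - 1
              = idx + ((1 + runLenAux true ks' : Nat) : Int) - 1 := by
            simp [hmlen]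
            omega
          rw [this]
        | cons b rest =>
          -- the run is closed by the first non-search key, then recurse
          have hb : b = false := by
            have hne := drop_runLenAux_ne true ks' b rest hdrop
            cases b
            · rfl
            · simp at hne
          subst hb
          have hlen' : ks'.length = runLenAux true ks' + 1 + rest.length := by
            have := congrArg List.length hdrop
            simp [List.length_drop] at this
            omega
          have hend : idx + ((true :: ks').length : Int) - 1
              = (idx + 1 + (runLenAux true ks' : Int) + 1) + (rest.length : Int) - 1 := by
            simp [hlen']
            omega
          rw [hend, ih rest (by simp [hlen'] at h ⊢; omega) (idx + 1 + (runLenAux true ks' : Int) + 1)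
            (segs ++ [(idx, idx + 1 + (runLenAux true ks' : Int) - 1)])]
          -- B side
          conv_rhs => rw [segsLoop.eq_def]
          simp only [runLen, reduceIte]
          have hdrop2 : ks'.drop (1 + runLenAux true ks' - 1) = false :: rest := by
            have : 1 + runLenAux true ks' - 1 = runLenAux true ks' := by omega
            rw [this]; exact hdrop
          rw [hdrop2, segsLoop_false]
          have e1 : idx + ((1 + runLenAux true ks' : Nat) : Int) + 1
              = idx + 1 + (runLenAux true ks' : Int) + 1 := by push_cast; ring
          have e2 : idx + ((1 + runLenAux true ks' : Nat) : Int) - 1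
              = idx + 1 + (runLenAux true ks' : Int) - 1 := by push_cast; ring
          rw [e1, e2]

-- ===== VERDICT (by name: the statement is the Claim_ definition above) =====
theorem find_search_segments_spec : Claim_equal_find_search_segments := by
  intro op_list _hdom _hpre
  unfold Spec_find_search_segments find_search_segments find_search_segments_alt
  rw [fold_enum_eq_auxK]
  have hmain := main_lemma (op_list.map (fun item => opKey item == "search")).length
    (op_list.map (fun item => opKey item == "search")) le_rfl 0 []
  have hkeys : ((op_list.map (fun item => opKey item == "search")).length : Int)
      = (op_list.length : Int) := by simp
  rw [hkeys, zero_add] at hmain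
  rw [← hmain]
  rfl
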